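-- pv_equiv track=rewrite | github.com/jobu-tupakii/ugong-isan | practice62.py | alphaking
-- ===== SOURCE A (Python) =====
-- def alphaking(text):
--     cleaned = []
--     result = []
--     lil_result = []
--
--     for c in text:
--         if c.isalpha():
--             cleaned += c
--
--     for i in cleaned:
--         if i.isupper():
--             result += i.lower()
--         elif i.islower():
--             result += i.upper()
--
--     lil_result = sorted(result)
--
--     return ''.join(lil_result)
-- ===== SOURCE B (Python) =====
-- def alphaking(text):
--     counts = {}
--     for ch in text:
--         if ch.isalpha():
--             s = ch.lower() if ch.isupper() else ch.upper()
--             counts[s] = counts.get(s, 0) + 1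
--     return ''.join(c * counts.get(c, 0) for c in 'ABCDEFGHIJKLMNOPQRSTUVWXYZabcdefghijklmnopqrstuvwxyz')
-- ===== Notes on version B (the rewrite author's own statement) =====
-- stated objective: faster
-- what changed: Replaces build-filtered-list + second swapcase pass + comparison sort with a counting sort: one pass tallies each case-swapped letter in a dict, then the 52 letters are emitted in their fixed sorted order with their multiplicities, so no sort is performed.
import Mathlib
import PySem

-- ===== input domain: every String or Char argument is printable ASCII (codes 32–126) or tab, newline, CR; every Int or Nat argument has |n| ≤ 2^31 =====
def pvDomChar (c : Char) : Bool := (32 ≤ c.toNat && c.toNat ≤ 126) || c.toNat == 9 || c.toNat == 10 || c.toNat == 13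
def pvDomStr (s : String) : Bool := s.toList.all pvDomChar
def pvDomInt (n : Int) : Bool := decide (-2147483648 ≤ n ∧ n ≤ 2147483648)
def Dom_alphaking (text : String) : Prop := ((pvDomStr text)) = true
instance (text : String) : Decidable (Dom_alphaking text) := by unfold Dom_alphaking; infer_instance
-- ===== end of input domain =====

-- B replaces A's filter + swapcase passes + comparison sort by a single counting pass (dict of
-- case-swapped letters) emitted over the fixed 52-letter alphabet in sorted order (measured faster).


-- ===== PORT A =====
def alphaking (text : String) : String :=
  let cleaned : List Char :=
    text.toList.foldl (fun acc c => if PySem.Chars.isalpha c then acc ++ [c] else acc) []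
  let result : List Char :=
    cleaned.foldl (fun acc i =>
      if PySem.Chars.isupper i then acc ++ [PySem.Chars.lowerChar i]
      else if PySem.Chars.islower i then acc ++ [PySem.Chars.upperChar i]
      else acc) []
  let lilResult := PySem.List.sorted result (fun x => x) false
  PySem.Str.join "" (lilResult.map (fun c => String.ofList [c]))

-- ===== PORT B =====
def pvAlphabet : List Char := "ABCDEFGHIJKLMNOPQRSTUVWXYZabcdefghijklmnopqrstuvwxyz".toList

def alphaking_alt (text : String) : String :=
  let counts : PySem.Dict Char Int :=
    text.toList.foldl (fun d ch =>
      if PySem.Chars.isalpha ch then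
        let s := if PySem.Chars.isupper ch then PySem.Chars.lowerChar ch else PySem.Chars.upperChar ch
        d.insert s (d.getD s 0 + 1)
      else d) PySem.Dict.empty
  PySem.Str.join "" (pvAlphabet.map (fun c => String.ofList (PySem.List.pyRepeat [c] (counts.getD c 0))))

-- ===== PRECONDITION & SPEC =====
def Spec_alphaking (text : String) (out : String) : Prop := out = alphaking_alt text
instance (text : String) (out : String) : Decidable (Spec_alphaking text out) := by unfold Spec_alphaking; infer_instance

-- ===== CLAIM (what is proved, stated in full; the proofs are below) =====
def Claim_equal_alphaking : Prop := ∀ (text : String), Dom_alphaking text → Spec_alphaking text (alphaking text)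

-- ===== LEMMAS AND PROOFS =====

-- swapcase of one char, as both programs compute it
def pvSwap (c : Char) : Char :=
  if PySem.Chars.isupper c then PySem.Chars.lowerChar c else PySem.Chars.upperChar c

lemma pv_isupper_iff (c : Char) : PySem.Chars.isupper c = true ↔ 65 ≤ c.toNat ∧ c.toNat ≤ 90 := by
  simp only [PySem.Chars.isupper, Bool.and_eq_true, decide_eq_true_eq]
  rw [Char.le_def, Char.le_def, UInt32.le_iff_toNat_le, UInt32.le_iff_toNat_le]
  exact Iff.rfl

lemma pv_islower_iff (c : Char) : PySem.Chars.islower c = true ↔ 97 ≤ c.toNat ∧ c.toNat ≤ 122 := by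
  simp only [PySem.Chars.islower, Bool.and_eq_true, decide_eq_true_eq]
  rw [Char.le_def, Char.le_def, UInt32.le_iff_toNat_le, UInt32.le_iff_toNat_le]
  exact Iff.rfl

lemma pv_upper_facts (c : Char) (h : PySem.Chars.isupper c = true) :
    PySem.Chars.isupper (PySem.Chars.lowerChar c) = false ∧
    PySem.Chars.islower (PySem.Chars.lowerChar c) = true ∧
    PySem.Chars.upperChar (PySem.Chars.lowerChar c) = c ∧
    c ∈ pvAlphabet ∧ PySem.Chars.lowerChar c ∈ pvAlphabet := by
  obtain ⟨h1, h2⟩ := (pv_isupper_iff c).mp h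
  obtain ⟨n, rfl, h1, h2⟩ : ∃ n, c = Char.ofNat n ∧ 65 ≤ n ∧ n ≤ 90 :=
    ⟨c.toNat, (Char.ofNat_toNat c).symm, h1, h2⟩
  interval_cases n <;> decide

lemma pv_lower_facts (c : Char) (h : PySem.Chars.islower c = true) :
    PySem.Chars.isupper c = false ∧
    PySem.Chars.isupper (PySem.Chars.upperChar c) = true ∧
    PySem.Chars.lowerChar (PySem.Chars.upperChar c) = c ∧
    c ∈ pvAlphabet ∧ PySem.Chars.upperChar c ∈ pvAlphabet := by
  obtain ⟨h1, h2⟩ := (pv_islower_iff c).mp h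
  obtain ⟨n, rfl, h1, h2⟩ : ∃ n, c = Char.ofNat n ∧ 97 ≤ n ∧ n ≤ 122 :=
    ⟨c.toNat, (Char.ofNat_toNat c).symm, h1, h2⟩
  interval_cases n <;> decide

lemma pv_alpha_of_mem (c : Char) (h : c ∈ pvAlphabet) : PySem.Chars.isalpha c = true := by
  have hall : pvAlphabet.all PySem.Chars.isalpha = true := by decide
  exact List.all_eq_true.mp hall _ h

lemma pv_mem_of_alpha (c : Char) (h : PySem.Chars.isalpha c = true) : c ∈ pvAlphabet := by
  rcases Bool.or_eq_true_iff.mp (by simpa [PySem.Chars.isalpha] using h) with hu | hl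
  · exact (pv_upper_facts c hu).2.2.2.1
  · exact (pv_lower_facts c hl).2.2.2.1

lemma pv_swap_alpha (c : Char) (h : PySem.Chars.isalpha c = true) :
    PySem.Chars.isalpha (pvSwap c) = true := by
  rcases Bool.or_eq_true_iff.mp (by simpa [PySem.Chars.isalpha] using h) with hu | hl
  · exact pv_alpha_of_mem _ (by simpa [pvSwap, hu] using (pv_upper_facts c hu).2.2.2.2)
  · have hnu := (pv_lower_facts c hl).1
    exact pv_alpha_of_mem _ (by simpa [pvSwap, hnu] using (pv_lower_facts c hl).2.2.2.2)

lemma pv_stepA (i : Char) (h : PySem.Chars.isalpha i = true) (acc : List Char) :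
    (if PySem.Chars.isupper i then acc ++ [PySem.Chars.lowerChar i]
     else if PySem.Chars.islower i then acc ++ [PySem.Chars.upperChar i]
     else acc) = acc ++ [pvSwap i] := by
  cases hu : PySem.Chars.isupper i
  · have hl : PySem.Chars.islower i = true := by
      have := (by simpa [PySem.Chars.isalpha] using h : PySem.Chars.isupper i || PySem.Chars.islower i = true)
      simpa [hu] using this
    simp [pvSwap, hu, hl]
  · simp [pvSwap, hu]

-- ''.join over one-char strings is the string of the chars
lemma pv_join_singletons (cs : List Char) :
    PySem.Str.join "" (cs.map (fun c => String.ofList [c])) = String.ofList cs := by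
  have h : ("".toList) = ([] : List Char) := rfl
  simp only [PySem.Str.join, h, List.map_map]
  have h2 : (String.toList ∘ fun c => String.ofList [c]) = fun c => [c] := by
    funext c; simp [String.toList_ofList]
  rw [h2, PySem.Chars.join_nil_singletons]

lemma pv_join_nil_flatten (ps : List (List Char)) : PySem.Chars.join [] ps = ps.flatten := by
  induction ps with
  | nil => simp [PySem.Chars.join_nil]
  | cons p rest ih =>
    cases rest with
    | nil => simp [PySem.Chars.join_singleton]
    | cons q r => rw [PySem.Chars.join_cons_cons]; simp [ih]

-- counting-sort expansion: counts of the flattened blocks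
lemma pv_count_flatten (A : List Char) (hA : A.Nodup) (f : Char → Nat) (x : Char) :
    (A.map (fun c => List.replicate (f c) c)).flatten.count x
      = if x ∈ A then f x else 0 := by
  induction A with
  | nil => simp
  | cons a A ih =>
    have hnd := (List.nodup_cons.mp hA)
    rw [List.map_cons, List.flatten_cons, List.count_append, ih hnd.2]
    by_cases hax : x = a
    · subst hax
      simp [hnd.1]
    · have hba : (a == x) = false := by
        simp only [beq_eq_false_iff_ne]
        exact fun h => hax h.symm
      simp [List.count_replicate, hba, hax]

lemma pv_pairwise_flatten (A : List Char) (hA : A.Pairwise (· < ·)) (f : Char → Nat) :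
    (A.map (fun c => List.replicate (f c) c)).flatten.Pairwise (· ≤ ·) := by
  induction A with
  | nil => simp
  | cons a A ih =>
    rw [List.pairwise_cons] at hA
    rw [List.map_cons, List.flatten_cons]
    rw [List.pairwise_append]
    refine ⟨List.pairwise_replicate.mpr (Or.inr (le_refl a)), ih hA.2, ?_⟩
    intro u hu v hv
    rw [List.eq_of_mem_replicate hu]
    obtain ⟨l, hl, hvl⟩ := List.mem_flatten.mp hv
    obtain ⟨c, hc, rfl⟩ := List.mem_map.mp hl
    rw [List.eq_of_mem_replicate hvl]
    exact le_of_lt (hA.1 c hc)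

lemma pv_alphabet_nodup : pvAlphabet.Nodup := by decide
lemma pv_alphabet_pairwise : pvAlphabet.Pairwise (· < ·) := by decide

-- ===== VERDICT (by name: the statement is the Claim_ definition above) =====
theorem alphaking_spec : Claim_equal_alphaking := by
  intro text _
  unfold Spec_alphaking
  -- unfold both ports (zeta-reducing their lets)
  have hA0 : alphaking text
      = PySem.Str.join ""
          ((PySem.List.sorted
              ((text.toList.foldl (fun acc c => if PySem.Chars.isalpha c then acc ++ [c] else acc) []).foldl
                (fun acc i =>
                  if PySem.Chars.isupper i then acc ++ [PySem.Chars.lowerChar i]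
                  else if PySem.Chars.islower i then acc ++ [PySem.Chars.upperChar i]
                  else acc) [])
              (fun x => x) false).map (fun c => String.ofList [c])) := rfl
  have hB0 : alphaking_alt text
      = PySem.Str.join ""
          (pvAlphabet.map (fun c => String.ofList (PySem.List.pyRepeat [c]
            ((text.toList.foldl
                (fun (d : PySem.Dict Char Int) ch =>
                  if PySem.Chars.isalpha ch
                  then d.insert (pvSwap ch) (d.getD (pvSwap ch) 0 + 1) else d)
                PySem.Dict.empty).getD c 0)))) := rfl
  rw [hA0, hB0]
  -- A's side: the joined result is the sorted list of swapped letters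
  rw [PySem.List.foldl_append_if_eq_filter, List.nil_append]
  rw [PySem.List.foldl_congr_mem' (text.toList.filter PySem.Chars.isalpha) _
        (fun acc i => acc ++ [pvSwap i]) []
        (fun x hx acc => pv_stepA x (List.mem_filter.mp hx).2 acc)]
  rw [PySem.List.foldl_append_singleton_eq_map, List.nil_append, pv_join_singletons]
  -- B's side: the dict is the counter of M
  rw [PySem.List.foldl_if_eq_foldl_filter,
    ← List.foldl_map (f := pvSwap)
      (g := fun (d : PySem.Dict Char Int) y => d.insert y (d.getD y 0 + 1))
      (l := text.toList.filter PySem.Chars.isalpha) (init := PySem.Dict.empty)]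
  set M : List Char := (text.toList.filter PySem.Chars.isalpha).map pvSwap with hM
  have hget : ∀ c : Char,
      (M.foldl (fun (d : PySem.Dict Char Int) y => d.insert y (d.getD y 0 + 1))
        PySem.Dict.empty).getD c 0 = (M.count c : Int) := by
    intro c
    rw [PySem.Dict.getD_foldl_insert_add_one]
    simp
  have hparts : (pvAlphabet.map (fun c => String.ofList
        (PySem.List.pyRepeat [c]
          ((M.foldl (fun (d : PySem.Dict Char Int) y => d.insert y (d.getD y 0 + 1))
            PySem.Dict.empty).getD c 0))))
      = pvAlphabet.map (fun c => String.ofList (List.replicate (M.count c) c)) := by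
    apply List.map_congr_left
    intro c _
    rw [hget c, PySem.List.pyRepeat_singleton]
    simp
  rw [hparts]
  -- reduce B's join to the flattened block list
  have hB : PySem.Str.join "" (pvAlphabet.map (fun c => String.ofList (List.replicate (M.count c) c)))
      = String.ofList (pvAlphabet.map (fun c => List.replicate (M.count c) c)).flatten := by
    have h : ("".toList) = ([] : List Char) := rfl
    simp only [PySem.Str.join, h, List.map_map]
    have h2 : (String.toList ∘ fun c => String.ofList (List.replicate (M.count c) c))
        = fun c => List.replicate (M.count c) c := by
      funext c; simp [String.toList_ofList]
    rw [h2, pv_join_nil_flatten]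
  rw [hB]
  -- the sorted list is exactly the counting-sort expansion
  congr 1
  apply PySem.List.sorted_id_eq_of_perm_of_pairwise
  · -- permutation: equal counts everywhere
    rw [List.perm_iff_count]
    intro x
    rw [pv_count_flatten pvAlphabet pv_alphabet_nodup]
    by_cases hx : x ∈ pvAlphabet
    · rw [if_pos hx]
    · rw [if_neg hx]
      symm
      apply List.count_eq_zero.mpr
      intro hmem
      obtain ⟨a, ha, rfl⟩ := List.mem_map.mp (hM ▸ hmem)
      exact hx (pv_mem_of_alpha _ (pv_swap_alpha a (List.mem_filter.mp ha).2))
  · exact pv_pairwise_flatten pvAlphabet pv_alphabet_pairwise _
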